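-- pv_equiv track=rewrite | github.com/cmashraf/kinexns | kinexns/optimize.py | create_parameter_name_list
-- ===== SOURCE A (Python) =====
-- def create_parameter_name_list(reaction_id, par_type='rate'):
--     if par_type == 'rate':
--         total_list = ['k{}'.format(i) for i in reaction_id]
--     else:
--         a_list = ['A{}'.format(i) for i in reaction_id]
--         n_list = ['n{}'.format(i) for i in reaction_id]
--         e_list = ['E{}'.format(i) for i in reaction_id]
--         # total_list = [a,  b, c for a_, b_, c_ in zip(a_list, n_list, e_list)]
--         ini_list = [list(a) for a in zip(a_list, n_list, e_list)]
--         total_list = [j for sub in ini_list for j in sub]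
--
--     return total_list
-- ===== SOURCE B (Python) =====
-- def create_parameter_name_list(reaction_id, par_type='rate'):
--     if par_type == 'rate':
--         return ['k{}'.format(i) for i in reaction_id]
--     return ['{}{}'.format(p, i) for i in reaction_id for p in ('A', 'n', 'E')]
-- ===== Notes on version B (the rewrite author's own statement) =====
-- stated objective: simpler
-- what changed: The non-rate branch builds the interleaved A/n/E names in one pass over reaction_id with a single nested comprehension, instead of constructing three separate per-prefix lists and then zipping and flattening them.
import Mathlib
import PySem

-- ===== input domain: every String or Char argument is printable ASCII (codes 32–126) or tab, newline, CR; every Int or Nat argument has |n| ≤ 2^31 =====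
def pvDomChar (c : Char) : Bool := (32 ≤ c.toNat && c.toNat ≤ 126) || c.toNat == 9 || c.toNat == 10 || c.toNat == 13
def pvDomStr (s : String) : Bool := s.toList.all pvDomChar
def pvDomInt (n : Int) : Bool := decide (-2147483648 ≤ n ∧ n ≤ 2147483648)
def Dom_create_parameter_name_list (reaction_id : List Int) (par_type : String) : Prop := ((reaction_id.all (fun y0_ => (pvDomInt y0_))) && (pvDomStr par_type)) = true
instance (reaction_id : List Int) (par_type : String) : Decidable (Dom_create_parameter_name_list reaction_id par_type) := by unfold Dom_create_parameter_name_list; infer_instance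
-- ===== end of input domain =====

-- ===== PORT A =====
-- B's non-rate branch replaces A's three per-prefix lists plus zip/flatten by one pass emitting A{i}, n{i}, E{i} per id (objective: simpler).
def create_parameter_name_list (reaction_id : List Int) (par_type : String) : List String :=
  if par_type == "rate" then
    reaction_id.map (fun i => "k" ++ PySem.Int.toStr i)
  else
    let a_list := reaction_id.map (fun i => "A" ++ PySem.Int.toStr i)
    let n_list := reaction_id.map (fun i => "n" ++ PySem.Int.toStr i)
    let e_list := reaction_id.map (fun i => "E" ++ PySem.Int.toStr i)
    let ini_list := (a_list.zip (n_list.zip e_list)).map (fun p => [p.1, p.2.1, p.2.2])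
    ini_list.flatten

-- ===== PORT B =====
def create_parameter_name_list_alt (reaction_id : List Int) (par_type : String) : List String :=
  if par_type == "rate" then
    reaction_id.map (fun i => "k" ++ PySem.Int.toStr i)
  else
    reaction_id.flatMap (fun i => ["A", "n", "E"].map (fun p => p ++ PySem.Int.toStr i))

-- ===== PRECONDITION & SPEC =====
def Spec_create_parameter_name_list (reaction_id : List Int) (par_type : String) (out : List String) : Prop := out = create_parameter_name_list_alt reaction_id par_type
instance (reaction_id : List Int) (par_type : String) (out : List String) : Decidable (Spec_create_parameter_name_list reaction_id par_type out) := by unfold Spec_create_parameter_name_list; infer_instance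

-- ===== CLAIM (what is proved, stated in full; the proofs are below) =====
def Claim_equal_create_parameter_name_list : Prop := ∀ (reaction_id : List Int) (par_type : String), Dom_create_parameter_name_list reaction_id par_type → Spec_create_parameter_name_list reaction_id par_type (create_parameter_name_list reaction_id par_type)

-- ===== LEMMAS AND PROOFS =====

-- ===== VERDICT (by name: the statement is the Claim_ definition above) =====
theorem create_parameter_name_list_spec : Claim_equal_create_parameter_name_list := by
  intro reaction_id par_type hd
  clear hd
  unfold Spec_create_parameter_name_list create_parameter_name_list create_parameter_name_list_alt
  by_cases h : par_type == "rate"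
  · simp [h]
  · simp only [h, Bool.false_eq_true, if_false]
    induction reaction_id with
    | nil => rfl
    | cons x xs ih => simp_all [List.map, List.zip, List.flatMap]
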